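-- pv_equiv track=rewrite | github.com/JamesGreeman/AdventOfCode2021 | 16/solution.py | get_literal_string
-- ===== SOURCE A (Python) =====
-- def get_literal_string(bit_string):
--     index = 6
--     chunks = [bit_string[index: index + 5]]
--     while not chunks[len(chunks) - 1][0] == '0':
--         index += 5
--         chunks.append(bit_string[index:index + 5])
--     literal_string = "".join(chunk[1:6] for chunk in chunks)
--     return literal_string
-- ===== SOURCE B (Python) =====
-- def get_literal_string(bit_string):
--     # find the start index of the terminating chunk (leading bit '0'),
--     # then strip every chunk-leading bit from the payload in one filter pass
--     i = 6
--     while bit_string[i] != '0':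
--         i += 5
--     body = bit_string[6:i + 5]
--     return ''.join(c for j, c in enumerate(body) if j % 5 != 0)
-- ===== Notes on version B (the rewrite author's own statement) =====
-- stated objective: simpler
-- what changed: B never builds the intermediate chunks list: it first locates the terminating chunk by testing single characters at indices 6, 11, 16, ..., then produces the literal with one positional filter (keep characters whose offset in the payload is not a multiple of 5) instead of joining chunk[1:6] slices.
-- outside the precondition, e.g. on get_literal_string('0'): A raises IndexError, B raises IndexError
import Mathlib
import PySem

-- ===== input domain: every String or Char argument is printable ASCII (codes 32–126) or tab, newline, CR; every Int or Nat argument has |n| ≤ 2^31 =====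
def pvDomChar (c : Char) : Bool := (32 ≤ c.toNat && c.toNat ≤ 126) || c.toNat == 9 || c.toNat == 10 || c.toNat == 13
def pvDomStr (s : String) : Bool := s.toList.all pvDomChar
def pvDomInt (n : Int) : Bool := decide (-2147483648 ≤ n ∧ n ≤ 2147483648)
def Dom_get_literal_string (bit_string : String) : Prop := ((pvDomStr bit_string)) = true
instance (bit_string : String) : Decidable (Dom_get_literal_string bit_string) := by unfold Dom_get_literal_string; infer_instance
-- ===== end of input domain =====

-- B avoids A's intermediate chunks list: it locates the terminating chunk by single-character
-- probes and strips every chunk-leading bit with one positional filter (objective: simpler).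

-- ===== PORT A =====
-- the while loop of A: state (index, chunks); fuel bounds the iteration count (never exhausted on Pre_)
def pvALoop (s : List Char) : Nat → Nat → List (List Char) → List (List Char)
  | 0, _, chunks => chunks
  | f + 1, index, chunks =>
    -- while not chunks[len(chunks) - 1][0] == '0':
    if ((PySem.List.pyGet? chunks ((chunks.length : Int) - 1)).bind
          (fun ch => PySem.List.pyGet? ch (0 : Int))) = some '0' then
      chunks
    else
      let index' := index + 5
      pvALoop s f index'
        (chunks ++ [PySem.List.slice s (some (index' : Int)) (some ((index' : Int) + 5))])

def get_literal_string (bit_string : String) : String :=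
  let s := bit_string.toList
  let chunks := pvALoop s (s.length + 1) 6 [PySem.List.slice s (some 6) (some 11)]
  -- "".join(chunk[1:6] for chunk in chunks)
  String.ofList ((chunks.map (fun ch => PySem.List.slice ch (some 1) (some 6))).flatten)

-- ===== PORT B =====
-- the search loop of B: i advances by 5 until bit_string[i] == '0'; fuel never exhausted on Pre_
def pvBFind (s : List Char) : Nat → Nat → Nat
  | 0, i => i
  | f + 1, i =>
    if PySem.List.pyGet? s (i : Int) = some '0' then i else pvBFind s f (i + 5)

def get_literal_string_alt (bit_string : String) : String :=
  let s := bit_string.toList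
  let i := pvBFind s (s.length + 1) 6
  let body := PySem.List.slice s (some 6) (some ((i : Int) + 5))
  -- ''.join(c for j, c in enumerate(body) if j % 5 != 0)
  String.ofList (((PySem.List.enumerate body 0).filter
      (fun p => !(PySem.Int.mod p.1 5 == 0))).map (·.2))

-- ===== PRECONDITION & SPEC =====
-- Pre_ excludes exactly the inputs on which A raises IndexError: those where no chunk starting
-- at index 6, 11, 16, … begins with '0' inside the string (the loop then runs off the end).
def Pre_get_literal_string (bit_string : String) : Prop :=
  ∃ k : Nat, k < bit_string.toList.length ∧ bit_string.toList[6 + 5 * k]? = some '0'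
instance (bit_string : String) : Decidable (Pre_get_literal_string bit_string) := by
  unfold Pre_get_literal_string; infer_instance

def pvWitness_get_literal_string : String := "110100101111111000101000"

def Spec_get_literal_string (bit_string : String) (out : String) : Prop :=
  out = get_literal_string_alt bit_string
instance (bit_string : String) (out : String) : Decidable (Spec_get_literal_string bit_string out) := by
  unfold Spec_get_literal_string; infer_instance

-- ===== CLAIM (what is proved, stated in full; the proofs are below) =====
def Claim_equal_get_literal_string : Prop :=
  ∀ (bit_string : String), Dom_get_literal_string bit_string →
    Pre_get_literal_string bit_string →
    Spec_get_literal_string bit_string (get_literal_string bit_string)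

-- ===== LEMMAS AND PROOFS =====

-- chunk starting at i, as both ports compute it after slice normalisation
def pvChunk (s : List Char) (i : Nat) : List Char := (s.drop i).take 5

-- reference for B's positional filter: drop each char whose running index ≡ 0 (mod 5)
def pvStrip : List Char → Nat → List Char
  | [], _ => []
  | a :: t, r => (if r = 0 then [] else [a]) ++ pvStrip t ((r + 1) % 5)

lemma pvSlice_chunk (s : List Char) (i : Nat) :
    PySem.List.slice s (some (i : Int)) (some ((i : Int) + 5)) = pvChunk s i := by
  rw [PySem.List.slice_toNat]
  · simp [pvChunk]; congr 1; omega
  all_goals positivity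

lemma pvSlice16 (c : List Char) (h : c.length ≤ 5) :
    PySem.List.slice c (some 1) (some 6) = c.drop 1 := by
  rw [PySem.List.slice_toNat]
  · norm_num
    omega
  all_goals norm_num

lemma pvCond_eq (s : List Char) (i : Nat) (pre : List (List Char)) :
    ((PySem.List.pyGet? (pre ++ [pvChunk s i]) (((pre ++ [pvChunk s i]).length : Int) - 1)).bind
      (fun ch => PySem.List.pyGet? ch (0 : Int))) = s[i]? := by
  have h1 : (((pre ++ [pvChunk s i]).length : Int) - 1) = ((pre.length : Nat) : Int) := by
    simp
  rw [h1, PySem.List.pyGet?_natCast]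
  have h2 : (pre ++ [pvChunk s i])[pre.length]? = some (pvChunk s i) := by simp
  rw [h2]
  show PySem.List.pyGet? (pvChunk s i) (0 : Int) = s[i]?
  rw [show ((0 : Int)) = (((0 : Nat)) : Int) by norm_num, PySem.List.pyGet?_natCast]
  simp [pvChunk, List.getElem?_drop]

lemma pvALoop_spec (s : List Char) :
    ∀ (k i f : Nat) (pre : List (List Char)), k < f →
      s[i + 5 * k]? = some '0' → (∀ j, j < k → s[i + 5 * j]? ≠ some '0') →
      pvALoop s f i (pre ++ [pvChunk s i]) =
        pre ++ (List.range (k + 1)).map (fun j => pvChunk s (i + 5 * j)) := by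
  intro k
  induction k with
  | zero =>
    intro i f pre hf h0 _
    cases f with
    | zero => omega
    | succ f' =>
      simp only [Nat.mul_zero, Nat.add_zero] at h0
      rw [pvALoop]
      simp only [pvCond_eq]
      rw [if_pos h0]
      simp
  | succ k ih =>
    intro i f pre hf h0 hmin
    cases f with
    | zero => omega
    | succ f' =>
      have hne : s[i]? ≠ some '0' := by
        have := hmin 0 (by omega); simpa using this
      rw [pvALoop]
      simp only [pvCond_eq]
      rw [if_neg hne]
      rw [pvSlice_chunk s (i + 5)]
      have hstep : s[(i + 5) + 5 * k]? = some '0' := by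
        have : (i + 5) + 5 * k = i + 5 * (k + 1) := by ring
        rw [this]; exact h0
      have hminstep : ∀ j, j < k → s[(i + 5) + 5 * j]? ≠ some '0' := by
        intro j hj
        have : (i + 5) + 5 * j = i + 5 * (j + 1) := by ring
        rw [this]; exact hmin (j + 1) (by omega)
      rw [ih (i + 5) f' (pre ++ [pvChunk s i]) (by omega) hstep hminstep]
      rw [List.append_assoc]
      congr 1
      conv_rhs => rw [List.range_succ_eq_map, List.map_cons, List.map_map]
      rw [List.singleton_append]
      congr 1
      apply List.map_congr_left
      intro j _
      have hidx : i + 5 + 5 * j = i + 5 * (j + 1) := by ring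
      simp [hidx]

lemma pvBFind_spec (s : List Char) :
    ∀ (k i f : Nat), k < f →
      s[i + 5 * k]? = some '0' → (∀ j, j < k → s[i + 5 * j]? ≠ some '0') →
      pvBFind s f i = i + 5 * k := by
  intro k
  induction k with
  | zero =>
    intro i f hf h0 _
    cases f with
    | zero => omega
    | succ f' =>
      simp only [Nat.mul_zero, Nat.add_zero] at h0 ⊢
      rw [pvBFind, PySem.List.pyGet?_natCast]
      rw [if_pos h0]
  | succ k ih =>
    intro i f hf h0 hmin
    cases f with
    | zero => omega
    | succ f' =>
      have hne : s[i]? ≠ some '0' := by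
        have := hmin 0 (by omega); simpa using this
      rw [pvBFind, PySem.List.pyGet?_natCast]
      rw [if_neg hne]
      have hstep : s[(i + 5) + 5 * k]? = some '0' := by
        have : (i + 5) + 5 * k = i + 5 * (k + 1) := by ring
        rw [this]; exact h0
      have hminstep : ∀ j, j < k → s[(i + 5) + 5 * j]? ≠ some '0' := by
        intro j hj
        have : (i + 5) + 5 * j = i + 5 * (j + 1) := by ring
        rw [this]; exact hmin (j + 1) (by omega)
      rw [ih (i + 5) f' (by omega) hstep hminstep]
      ring

lemma pvFilterEnum_eq_strip (l : List Char) :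
    ∀ (j : Nat),
      ((PySem.List.enumerate l ((j : Nat) : Int)).filter
          (fun p => !(PySem.Int.mod p.1 5 == 0))).map (·.2) = pvStrip l (j % 5) := by
  induction l with
  | nil => intro j; simp [pvStrip, PySem.List.enumerate]
  | cons a t ih =>
    intro j
    rw [PySem.List.enumerate_cons]
    have hm : PySem.Int.mod ((j : Nat) : Int) 5 = (((j % 5 : Nat)) : Int) :=
      PySem.Int.mod_natCast j 5
    have hsucc : ((j : Nat) : Int) + 1 = (((j + 1 : Nat)) : Int) := by push_cast; ring
    rw [List.filter_cons]
    by_cases h : j % 5 = 0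
    · have hc : (!(PySem.Int.mod ((j : Nat) : Int) 5 == 0)) = false := by
        rw [hm, h]; simp
      rw [hc]
      rw [if_neg (by simp)]
      rw [hsucc, ih (j + 1)]
      rw [pvStrip, if_pos h]
      have : (j % 5 + 1) % 5 = (j + 1) % 5 := by omega
      rw [this]
      simp
    · have hc : (!(PySem.Int.mod ((j : Nat) : Int) 5 == 0)) = true := by
        rw [hm]; simp; omega
      rw [if_pos hc]
      rw [List.map_cons]
      rw [hsucc, ih (j + 1)]
      rw [pvStrip, if_neg h]
      have : (j % 5 + 1) % 5 = (j + 1) % 5 := by omega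
      rw [this]
      simp

lemma pvStrip_append (x : List Char) :
    ∀ (y : List Char) (r : Nat), r < 5 →
      pvStrip (x ++ y) r = pvStrip x r ++ pvStrip y ((r + x.length) % 5) := by
  induction x with
  | nil =>
    intro y r hr
    simp [pvStrip, Nat.mod_eq_of_lt hr]
  | cons a t ih =>
    intro y r hr
    rw [List.cons_append, pvStrip, pvStrip]
    rw [ih y ((r + 1) % 5) (by omega)]
    rw [List.append_assoc]
    congr 3
    simp only [List.length_cons]
    omega

lemma pvStrip_small (l : List Char) (h : l.length ≤ 5) : pvStrip l 0 = l.drop 1 := by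
  rcases l with _ | ⟨a, _ | ⟨b, _ | ⟨c, _ | ⟨d, _ | ⟨e, t⟩⟩⟩⟩⟩
  · simp [pvStrip]
  · simp [pvStrip]
  · simp [pvStrip]
  · simp [pvStrip]
  · simp [pvStrip]
  · have ht : t = [] := by simp at h; exact List.eq_nil_of_length_eq_zero (by omega)
    subst ht
    simp [pvStrip]

lemma pvStrip_take (k : Nat) :
    ∀ (t : List Char),
      pvStrip (t.take (5 * k + 5)) 0 =
        ((List.range (k + 1)).map (fun j => ((t.drop (5 * j)).take 5).drop 1)).flatten := by
  induction k with
  | zero =>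
    intro t
    rw [pvStrip_small _ (by simp)]
    simp
  | succ k ih =>
    intro t
    have hsplit : 5 * (k + 1) + 5 = 5 + (5 * k + 5) := by ring
    rw [hsplit, List.take_add]
    rw [pvStrip_append _ _ 0 (by omega)]
    rw [pvStrip_small _ (by simp)]
    by_cases h5 : 5 ≤ t.length
    · have hlen : (t.take 5).length = 5 := by simp; omega
      have hmod : (0 + (t.take 5).length) % 5 = 0 := by rw [hlen]
      rw [hmod, ih (t.drop 5)]
      conv_rhs => rw [List.range_succ_eq_map, List.map_cons, List.flatten_cons, List.map_map]
      congr 1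
      congr 1
      apply List.map_congr_left
      intro j _
      have harg : List.drop (5 * j) (List.drop 5 t) = List.drop (5 * (j + 1)) t := by
        rw [List.drop_drop]
        congr 1
        omega
      simp [harg]
    · have htk : t.take 5 = t := List.take_of_length_le (by omega)
      have hdr : t.drop 5 = [] := List.drop_eq_nil_of_le (by omega)
      rw [hdr]
      conv_rhs => rw [List.range_succ_eq_map, List.map_cons, List.flatten_cons, List.map_map]
      have hz : ((List.range (k + 1)).map ((fun j => ((t.drop (5 * j)).take 5).drop 1) ∘ Nat.succ)).flatten = ([] : List Char) := by
        rw [List.flatten_eq_nil_iff]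
        intro l hl
        rw [List.mem_map] at hl
        obtain ⟨j, _, hj⟩ := hl
        have hd : t.drop (5 * (j + 1)) = [] := List.drop_eq_nil_of_le (by omega)
        rw [← hj]
        simp [Function.comp, hd]
      rw [hz]
      simp [pvStrip]

-- ===== VERDICT (by name: the statement is the Claim_ definition above) =====
theorem get_literal_string_spec : Claim_equal_get_literal_string := by
  intro bs _ hpre
  unfold Spec_get_literal_string get_literal_string get_literal_string_alt
  dsimp only
  set s := bs.toList with hs
  have hP : ∃ k, s[6 + 5 * k]? = some '0' := by
    obtain ⟨k, _, hk⟩ := hpre; exact ⟨k, hk⟩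
  have hk0 : s[6 + 5 * Nat.find hP]? = some '0' := Nat.find_spec hP
  have hmin : ∀ j, j < Nat.find hP → s[6 + 5 * j]? ≠ some '0' :=
    fun j hj => Nat.find_min hP hj
  have hlt : 6 + 5 * Nat.find hP < s.length := by
    rcases List.getElem?_eq_some_iff.mp hk0 with ⟨h, _⟩; exact h
  have hfuel : Nat.find hP < s.length + 1 := by omega
  -- A side
  have hinit : PySem.List.slice s (some 6) (some 11) = pvChunk s 6 := by
    have h6 := pvSlice_chunk s 6
    norm_num at h6
    exact h6
  have hA := pvALoop_spec s (Nat.find hP) 6 (s.length + 1) [] hfuel hk0 hmin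
  rw [List.nil_append] at hA
  -- B side
  have hB := pvBFind_spec s (Nat.find hP) 6 (s.length + 1) hfuel hk0 hmin
  rw [hinit, hA, hB]
  have hbody : PySem.List.slice s (some 6) (some (((6 + 5 * Nat.find hP : Nat) : Int) + 5)) =
      (s.drop 6).take (5 * Nat.find hP + 5) := by
    have hcast : (((6 + 5 * Nat.find hP : Nat)) : Int) + 5 = (((5 * Nat.find hP + 11 : Nat)) : Int) := by
      push_cast; ring
    rw [hcast, PySem.List.slice_toNat]
    · have h6 : ((6 : Int)).toNat = 6 := by omega
      have h11 : (((5 * Nat.find hP + 11 : Nat)) : Int).toNat = 5 * Nat.find hP + 11 := by omega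
      rw [h6, h11]
      congr 1
    all_goals positivity
  rw [hbody]
  have hstrip := pvFilterEnum_eq_strip ((s.drop 6).take (5 * Nat.find hP + 5)) 0
  rw [Nat.cast_zero, Nat.zero_mod] at hstrip
  rw [hstrip, pvStrip_take]
  congr 1
  rw [List.nil_append, List.map_map]
  congr 1
  apply List.map_congr_left
  intro j _
  have harg : List.drop (5 * j) (List.drop 6 s) = List.drop (6 + 5 * j) s := by
    rw [List.drop_drop]
  simp only [Function.comp_apply]
  rw [pvSlice16 _ (by simp [pvChunk])]
  simp [pvChunk, harg]
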